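-- pv_equiv track=rewrite | github.com/DMgzh/CBRF_parser | db_creator.py | merge_months
-- ===== SOURCE A (Python) =====
-- def merge_months(cb_dict):
--     new_cb_dict = {}
--     for cb_id in cb_dict:
--         new_cb_dict[cb_id] = {}
--
--         for date in cb_dict[cb_id]:
--             short_date = date[:6]
--
--             if short_date not in new_cb_dict[cb_id]:
--                 new_cb_dict[cb_id][short_date] = []
--
--             if len(cb_dict[cb_id][date]) > len(new_cb_dict[cb_id][short_date]):
--                 new_cb_dict[cb_id][short_date] = cb_dict[cb_id][date]
--
--     return new_cb_dict
-- ===== SOURCE B (Python) =====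
-- def merge_months(cb_dict):
--     new_cb_dict = {}
--     for cb_id, dates in cb_dict.items():
--         groups = {}
--         for date, value in dates.items():
--             groups.setdefault(date[:6], []).append(value)
--         new_cb_dict[cb_id] = {sd: max(vals, key=len) for sd, vals in groups.items()}
--     return new_cb_dict
-- ===== Notes on version B (the rewrite author's own statement) =====
-- stated objective: idiomatic
-- what changed: Replaces the fused ensure-key-then-running-max loop by an explicit group-then-reduce: a first pass builds sd -> list of all month values with setdefault/append, a second pass reduces each group with max(vals, key=len) (first-longest tie-break), instead of maintaining the current best inside the single loop.
import Mathlib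
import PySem

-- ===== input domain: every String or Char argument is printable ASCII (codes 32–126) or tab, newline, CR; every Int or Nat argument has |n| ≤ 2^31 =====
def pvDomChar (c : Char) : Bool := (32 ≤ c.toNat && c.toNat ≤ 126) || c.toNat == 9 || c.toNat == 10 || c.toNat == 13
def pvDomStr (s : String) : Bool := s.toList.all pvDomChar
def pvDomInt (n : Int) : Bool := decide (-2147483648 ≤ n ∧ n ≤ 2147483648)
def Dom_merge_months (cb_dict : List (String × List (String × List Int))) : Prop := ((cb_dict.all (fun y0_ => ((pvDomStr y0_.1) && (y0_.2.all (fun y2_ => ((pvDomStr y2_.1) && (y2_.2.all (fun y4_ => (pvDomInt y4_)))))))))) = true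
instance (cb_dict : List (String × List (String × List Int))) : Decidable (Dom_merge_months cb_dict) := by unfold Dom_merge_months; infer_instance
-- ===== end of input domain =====

-- B replaces A's fused ensure-key/running-max loop by an explicit group-then-reduce
-- (group all values per month, then take the first-longest of each group): idiomatic, same cost.

-- ===== PORT A =====
-- inner loop of A: for date in cb_dict[cb_id], keep the longest value per date[:6]
def mergeMonthsInnerA (dates : List (String × List Int)) : PySem.Dict String (List Int) :=
  dates.foldl (fun d p =>
    let sd := PySem.Str.slice p.1 none (some 6)
    let d1 := if d.contains sd then d else d.insert sd []
    if p.2.length > (d1.getD sd []).length then d1.insert sd p.2 else d1)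
    PySem.Dict.empty

def merge_months (cb_dict : List (String × List (String × List Int))) : List (String × List (String × List Int)) :=
  (cb_dict.foldl (fun nd p => nd.insert p.1 (mergeMonthsInnerA p.2).items) PySem.Dict.empty).items

-- ===== PORT B =====
-- first pass of B: groups = {sd: [all values with that short date]}
def mergeMonthsGroups (dates : List (String × List Int)) : PySem.Dict String (List (List Int)) :=
  dates.foldl (fun g p => g.modify (PySem.Str.slice p.1 none (some 6)) [] (fun vs => vs ++ [p.2])) PySem.Dict.empty

-- second pass of B: {sd: max(vals, key=len)}; vals is never empty, .getD [] only totalises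
def mergeMonthsInnerB (dates : List (String × List Int)) : List (String × List Int) :=
  (mergeMonthsGroups dates).items.map (fun q => (q.1, (PySem.List.max? q.2 (fun v => v.length)).getD []))

def merge_months_alt (cb_dict : List (String × List (String × List Int))) : List (String × List (String × List Int)) :=
  (cb_dict.foldl (fun nd p => nd.insert p.1 (mergeMonthsInnerB p.2)) PySem.Dict.empty).items

-- ===== PRECONDITION & SPEC =====
-- Pre_ requires distinct keys at both levels: the assoc-list arguments encode Python dicts,
-- which cannot hold duplicate keys, so Pre_ excludes no input the Python A actually accepts.
def Pre_merge_months (cb_dict : List (String × List (String × List Int))) : Prop :=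
  (cb_dict.map (·.1)).Nodup ∧ ∀ p ∈ cb_dict, (p.2.map (·.1)).Nodup
instance (cb_dict : List (String × List (String × List Int))) : Decidable (Pre_merge_months cb_dict) := by unfold Pre_merge_months; infer_instance

def pvWitness_merge_months : (List (String × List (String × List Int))) :=
  [("R01", [("20100115", [1, 2]), ("20100120", [3]), ("20100201", [4])]),
   ("R02", [("20100116", [])])]

def Spec_merge_months (cb_dict : List (String × List (String × List Int))) (out : List (String × List (String × List Int))) : Prop := out = merge_months_alt cb_dict
instance (cb_dict : List (String × List (String × List Int))) (out : List (String × List (String × List Int))) : Decidable (Spec_merge_months cb_dict out) := by unfold Spec_merge_months; infer_instance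

-- ===== CLAIM (what is proved, stated in full; the proofs are below) =====
def Claim_equal_merge_months : Prop := ∀ (cb_dict : List (String × List (String × List Int))), Dom_merge_months cb_dict → Pre_merge_months cb_dict → Spec_merge_months cb_dict (merge_months cb_dict)

-- ===== LEMMAS AND PROOFS =====

-- the running-max step A performs per value
def pvBest (b v : List Int) : List Int := if v.length > b.length then v else b

-- A's inner step, on a dict with distinct keys, is a single insert of pvBest
theorem pv_insert_getD_self (d : PySem.Dict String (List Int)) (k : String) (d0 : List Int)
    (hc : d.contains k = true) (hnd : d.keys.Nodup) : d.insert k (d.getD k d0) = d := by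
  apply PySem.Dict.ext
  rw [PySem.Dict.items_insert_of_contains _ _ hc]
  have h : ∀ p ∈ d.items, (if p.1 == k then (k, d.getD k d0) else p) = p := by
    intro p hp
    by_cases hk : p.1 = k
    · subst hk
      have := PySem.Dict.getD_of_mem_items (d := d) (k := p.1) (v := p.2) hp hnd (d0 := d0)
      simp [this]
    · simp [hk]
  calc d.items.map (fun p => if p.1 == k then (k, d.getD k d0) else p)
      = d.items.map id := List.map_congr_left h
    _ = d.items := List.map_id _

theorem pv_stepA_eq (d : PySem.Dict String (List Int)) (p : String × List Int)
    (hnd : d.keys.Nodup) :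
    (let sd := PySem.Str.slice p.1 none (some 6)
     let d1 := if d.contains sd then d else d.insert sd []
     if p.2.length > (d1.getD sd []).length then d1.insert sd p.2 else d1)
    = d.insert (PySem.Str.slice p.1 none (some 6))
        (pvBest (d.getD (PySem.Str.slice p.1 none (some 6)) []) p.2) := by
  set sd := PySem.Str.slice p.1 none (some 6) with hsd
  by_cases hc : d.contains sd = true
  · simp only [hc, if_true, pvBest]
    by_cases hlt : p.2.length > (d.getD sd []).length
    · simp [hlt]
    · simp [hlt, pv_insert_getD_self d sd [] hc hnd]
  · have hc' : d.contains sd = false := by simpa using hc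
    have hgd : d.getD sd [] = [] := PySem.Dict.getD_of_not_contains _ _ hc'
    simp only [hc', if_false, Bool.false_eq_true, pvBest, hgd,
      PySem.Dict.getD_insert_self]
    by_cases hlen : p.2.length > 0
    · simp [hlen, PySem.Dict.insert_insert_self]
    · have h0 : p.2 = [] := by simpa using hlen
      simp [h0]

-- with distinct keys maintained, A's fold is the insert-pvBest fold
theorem pv_foldA_eq (dates : List (String × List Int)) (d : PySem.Dict String (List Int))
    (hnd : d.keys.Nodup) :
    dates.foldl (fun d p =>
      let sd := PySem.Str.slice p.1 none (some 6)
      let d1 := if d.contains sd then d else d.insert sd []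
      if p.2.length > (d1.getD sd []).length then d1.insert sd p.2 else d1) d
    = dates.foldl (fun d p => d.insert (PySem.Str.slice p.1 none (some 6))
        (pvBest (d.getD (PySem.Str.slice p.1 none (some 6)) []) p.2)) d := by
  induction dates generalizing d with
  | nil => rfl
  | cons p t ih =>
    simp only [List.foldl_cons]
    rw [pv_stepA_eq d p hnd]
    exact ih _ (PySem.Dict.nodup_keys_insert _ _ _ hnd)

-- the insert-pvBest fold computes, at each key, the running max over that key's group
theorem pv_getD_foldl_insert (l : List (String × List Int)) (d : PySem.Dict String (List Int))
    (c : String) :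
    (l.foldl (fun d p => d.insert (PySem.Str.slice p.1 none (some 6))
        (pvBest (d.getD (PySem.Str.slice p.1 none (some 6)) []) p.2)) d).getD c []
    = ((l.filter (fun p => PySem.Str.slice p.1 none (some 6) == c)).map (·.2)).foldl
        pvBest (d.getD c []) := by
  induction l generalizing d with
  | nil => rfl
  | cons p t ih =>
    simp only [List.foldl_cons, List.filter_cons]
    by_cases hk : PySem.Str.slice p.1 none (some 6) = c
    · simp only [hk, beq_self_eq_true, if_true, List.map_cons, List.foldl_cons]
      rw [ih, PySem.Dict.getD_insert]
      simp
    · have : (PySem.Str.slice p.1 none (some 6) == c) = false := by simp [hk]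
      simp only [this, Bool.false_eq_true, if_false]
      rw [ih, PySem.Dict.getD_insert]
      simp [Ne.symm hk]

-- pvBest [] v = v (lists of equal length zero are both [])
theorem pv_best_nil (v : List Int) : pvBest [] v = v := by
  unfold pvBest
  cases v <;> simp

-- Python's max(vals, key=len) is the running pvBest fold (first-longest on ties)
theorem pv_max_cons (vs : List (List Int)) : ∀ v : List Int,
    PySem.List.max? (v :: vs) (fun l => l.length) = some (vs.foldl pvBest v) := by
  induction vs with
  | nil => intro v; rfl
  | cons x t ih =>
    intro v
    have h1 : PySem.List.max? (v :: x :: t) (fun l => l.length)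
        = PySem.List.max? (pvBest v x :: t) (fun l => l.length) := by
      unfold pvBest
      by_cases h : x.length > v.length
      · simp [PySem.List.max?, h]
      · simp [PySem.List.max?, h]
    rw [h1, ih, List.foldl_cons]

theorem pv_max_eq_foldl (vals : List (List Int)) :
    (PySem.List.max? vals (fun v => v.length)).getD [] = vals.foldl pvBest [] := by
  cases vals with
  | nil => rfl
  | cons v vs => rw [pv_max_cons vs v, List.foldl_cons, pv_best_nil]; rfl

-- the grouped list at key c
theorem pv_getD_groups (dates : List (String × List Int)) (c : String) :
    (mergeMonthsGroups dates).getD c []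
    = (dates.filter (fun p => PySem.Str.slice p.1 none (some 6) == c)).map (·.2) := by
  unfold mergeMonthsGroups
  have hmap : dates.foldl (fun g p => g.modify (PySem.Str.slice p.1 none (some 6)) [] (fun vs => vs ++ [p.2])) PySem.Dict.empty
      = (dates.map (fun p => (PySem.Str.slice p.1 none (some 6), p.2))).foldl
          (fun g q => g.modify q.1 [] (fun vs => vs ++ [q.2])) PySem.Dict.empty := by
    rw [List.foldl_map]
  rw [hmap, PySem.Dict.getD_foldl_modify_append]
  simp [List.filter_map, Function.comp_def]

-- the heart of the equivalence: A's inner dict, as items, is B's inner list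
theorem pv_inner_eq (dates : List (String × List Int)) :
    (mergeMonthsInnerA dates).items = mergeMonthsInnerB dates := by
  unfold mergeMonthsInnerA mergeMonthsInnerB
  rw [pv_foldA_eq dates PySem.Dict.empty (by simp [PySem.Dict.keys_empty])]
  have hndA : ((dates.foldl (fun d p => d.insert (PySem.Str.slice p.1 none (some 6))
        (pvBest (d.getD (PySem.Str.slice p.1 none (some 6)) []) p.2)) PySem.Dict.empty)).keys.Nodup :=
    PySem.Dict.nodup_keys_foldl_insert_key dates (fun p => PySem.Str.slice p.1 none (some 6)) _ _
      (by simp [PySem.Dict.keys_empty])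
  have hndG : (mergeMonthsGroups dates).keys.Nodup := by
    unfold mergeMonthsGroups
    exact PySem.Dict.nodup_keys_foldl_modify_key dates (fun p => PySem.Str.slice p.1 none (some 6)) _ _ _
      (by simp [PySem.Dict.keys_empty])
  have hkeys : ((dates.foldl (fun d p => d.insert (PySem.Str.slice p.1 none (some 6))
        (pvBest (d.getD (PySem.Str.slice p.1 none (some 6)) []) p.2)) PySem.Dict.empty)).keys
      = (mergeMonthsGroups dates).keys := by
    unfold mergeMonthsGroups
    rw [PySem.Dict.keys_foldl_insert_key dates (fun p => PySem.Str.slice p.1 none (some 6)),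
        PySem.Dict.keys_foldl_modify_key dates (fun p => PySem.Str.slice p.1 none (some 6))]
    rfl
  rw [PySem.Dict.items_eq_map_keys _ hndA [], PySem.Dict.items_eq_map_keys _ hndG []]
  rw [hkeys, List.map_map]
  apply List.map_congr_left
  intro k _
  simp only [Function.comp_apply]
  rw [pv_getD_foldl_insert, pv_getD_groups, pv_max_eq_foldl]
  simp [PySem.Dict.getD_empty]

-- ===== VERDICT (by name: the statement is the Claim_ definition above) =====
theorem merge_months_spec : Claim_equal_merge_months := by
  intro cb_dict _ _
  unfold Spec_merge_months merge_months merge_months_alt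
  simp only [pv_inner_eq]
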